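-- pv_equiv track=rewrite | github.com/mimbrero/wines | src/util/matplotlib_utils.py | _sort_and_unzip_labels_and_values
-- ===== SOURCE A (Python) =====
-- from typing import Callable, Dict, Tuple
--
-- def _sort_and_unzip_labels_and_values(data: Dict[str, int], others_label) -> Tuple[str, int]:
--     """
--     Ordena los datos de mayor a menor, dejando la etiqueta others_label al final. Devuelve esos datos separados en
--      una lista con las etiquetas y otra lista con los valores.
--
--     @param data: datos a ordenar y devolver
--     @param others_label: etiqueta que quedará al final, la agrupación de los datos menores a un porcentaje.
--     @return: una tupla con dos listas, la primera con las etiquetas y la segunda con los valores, en orden.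
--     """
--     items = sorted(data.items(), key=lambda item: item[1], reverse=True)
--     labels, values = [list(generator_item) for generator_item in zip(*items)]  # Unzip, reverse zip operation [1]
--
--     # Make "others" be at the end
--     if others_label in data:
--         index = labels.index(others_label)
--         labels.append(labels.pop(index))
--         values.append(values.pop(index))
--
--     return labels, values
-- ===== SOURCE B (Python) =====
-- def _sort_and_unzip_labels_and_values(data, others_label):
--     rest = sorted((item for item in data.items() if item[0] != others_label),
--                   key=lambda item: item[1], reverse=True)
--     if others_label in data:
--         rest.append((others_label, data[others_label]))
--     return [label for label, _ in rest], [value for _, value in rest]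
-- ===== Notes on version B (the rewrite author's own statement) =====
-- stated objective: simpler
-- what changed: Instead of sorting all items by value descending and then relocating the others entry via index/pop/append, B filters the others entry out, sorts only the rest descending, appends the others item, and unzips with two comprehensions.
import Mathlib
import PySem

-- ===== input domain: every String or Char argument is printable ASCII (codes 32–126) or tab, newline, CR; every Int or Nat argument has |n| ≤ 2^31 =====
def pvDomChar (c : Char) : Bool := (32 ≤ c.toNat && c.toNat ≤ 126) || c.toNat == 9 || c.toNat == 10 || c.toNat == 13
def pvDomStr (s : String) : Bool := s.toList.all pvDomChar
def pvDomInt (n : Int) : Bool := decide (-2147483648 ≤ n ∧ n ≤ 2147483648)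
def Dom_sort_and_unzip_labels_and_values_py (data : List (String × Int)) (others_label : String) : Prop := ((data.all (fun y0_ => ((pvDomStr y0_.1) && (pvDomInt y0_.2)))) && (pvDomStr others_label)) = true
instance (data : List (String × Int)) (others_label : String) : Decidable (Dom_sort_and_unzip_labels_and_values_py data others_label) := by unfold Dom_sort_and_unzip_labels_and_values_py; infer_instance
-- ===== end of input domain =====

-- B replaces A's sort-everything-then-index/pop/append relocation by: filter the others entry out,
-- sort the rest descending once, append the others item, unzip by two maps (objective: simpler).

-- ===== PORT A =====
def sort_and_unzip_labels_and_values_py (data : List (String × Int)) (others_label : String) : List String × List Int :=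
  let items := PySem.List.sorted data (fun item => item.2) true
  let labels := items.map (fun item => item.1)
  let values := items.map (fun item => item.2)
  if data.any (fun p => p.1 == others_label) then
    match PySem.List.index? labels others_label with
    | some index =>
      match PySem.List.pop? labels (index : Int), PySem.List.pop? values (index : Int) with
      | some (l, labels'), some (v, values') => (labels' ++ [l], values' ++ [v])
      | _, _ => (labels, values)   -- unreachable (index is in range); keeps the match total
    | none => (labels, values)     -- unreachable (others_label ∈ labels); keeps the match total
  else (labels, values)

-- ===== PORT B =====
def sort_and_unzip_labels_and_values_py_alt (data : List (String × Int)) (others_label : String) : List String × List Int :=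
  let rest0 := PySem.List.sorted (data.filter (fun item => item.1 != others_label)) (fun item => item.2) true
  let rest := if data.any (fun p => p.1 == others_label)
    then rest0 ++ [(others_label, PySem.Dict.getD (PySem.Dict.mk data) others_label 0)]
    else rest0
  (rest.map (fun p => p.1), rest.map (fun p => p.2))

-- ===== PRECONDITION & SPEC =====
-- data models a Python dict, so its keys are unique (a duplicate-key association list corresponds to
-- no dict); the empty dict is excluded because A's 'labels, values = [... zip(*items)]' unpacking
-- raises ValueError there.
def Pre_sort_and_unzip_labels_and_values_py (data : List (String × Int)) (others_label : String) : Prop :=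
  data ≠ [] ∧ (data.map Prod.fst).Nodup
instance (data : List (String × Int)) (others_label : String) : Decidable (Pre_sort_and_unzip_labels_and_values_py data others_label) := by unfold Pre_sort_and_unzip_labels_and_values_py; infer_instance
def pvWitness_sort_and_unzip_labels_and_values_py : (List (String × Int)) × String :=
  ([("a", 3), ("otros", 10), ("b", 3)], "otros")


def Spec_sort_and_unzip_labels_and_values_py (data : List (String × Int)) (others_label : String) (out : List String × List Int) : Prop := out = sort_and_unzip_labels_and_values_py_alt data others_label
instance (data : List (String × Int)) (others_label : String) (out : List String × List Int) : Decidable (Spec_sort_and_unzip_labels_and_values_py data others_label out) := by unfold Spec_sort_and_unzip_labels_and_values_py; infer_instance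

-- ===== CLAIM (what is proved, stated in full; the proofs are below) =====
def Claim_equal_sort_and_unzip_labels_and_values_py : Prop := ∀ (data : List (String × Int)) (others_label : String), Dom_sort_and_unzip_labels_and_values_py data others_label → Pre_sort_and_unzip_labels_and_values_py data others_label → Spec_sort_and_unzip_labels_and_values_py data others_label (sort_and_unzip_labels_and_values_py data others_label)

-- ===== LEMMAS AND PROOFS =====

-- the comparator of the reverse=True sort by value
def pvBef (a b : String × Int) : Bool := decide (b.2 < a.2)

theorem pv_insertBy_front (x : String × Int) (l : List (String × Int))
    (h : ∀ z ∈ l, z.2 < x.2) : PySem.List.insertBy pvBef x l = x :: l := by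
  cases l with
  | nil => rfl
  | cons y ys => simp [PySem.List.insertBy, pvBef, h y (by simp)]

theorem pv_pairwise_insertBy (x : String × Int) (l : List (String × Int))
    (h : l.Pairwise (fun a b => b.2 ≤ a.2)) :
    (PySem.List.insertBy pvBef x l).Pairwise (fun a b => b.2 ≤ a.2) := by
  induction l with
  | nil => simp [PySem.List.insertBy]
  | cons y ys ih =>
    rcases List.pairwise_cons.mp h with ⟨hy, hys⟩
    by_cases hb : pvBef x y = true
    · have hxy : y.2 < x.2 := by simpa [pvBef] using hb
      simp only [PySem.List.insertBy, hb, if_pos]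
      refine List.pairwise_cons.mpr ⟨?_, h⟩
      intro z hz
      rcases List.mem_cons.mp hz with hz | hz
      · exact le_of_lt (hz ▸ hxy)
      · exact le_trans (hy z hz) (le_of_lt hxy)
    · simp only [PySem.List.insertBy, hb, if_neg, Bool.false_eq_true, not_false_iff]
      refine List.pairwise_cons.mpr ⟨?_, ih hys⟩
      intro z hz
      rcases (PySem.List.mem_insertBy pvBef x z ys).mp hz with hz | hz
      · subst hz; simpa [pvBef] using hb
      · exact hy z hz

theorem pv_filter_insertBy (p : String × Int → Bool) (x : String × Int) (l : List (String × Int))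
    (h : l.Pairwise (fun a b => b.2 ≤ a.2)) :
    (PySem.List.insertBy pvBef x l).filter p
      = if p x then PySem.List.insertBy pvBef x (l.filter p) else l.filter p := by
  induction l with
  | nil => cases hp : p x <;> simp [PySem.List.insertBy, List.filter, hp]
  | cons y ys ih =>
    rcases List.pairwise_cons.mp h with ⟨hy, hys⟩
    by_cases hb : pvBef x y = true
    · have hxy : y.2 < x.2 := by simpa [pvBef] using hb
      have hfront : PySem.List.insertBy pvBef x ((y :: ys).filter p) = x :: (y :: ys).filter p := by
        refine pv_insertBy_front x _ ?_
        intro z hz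
        have hz' := List.mem_of_mem_filter hz
        rcases List.mem_cons.mp hz' with hz' | hz'
        · exact hz' ▸ hxy
        · exact lt_of_le_of_lt (hy z hz') hxy
      cases hp : p x
      · simp only [PySem.List.insertBy, hb, if_pos]
        simp [List.filter_cons, hp]
      · simp only [PySem.List.insertBy, hb, if_pos]
        rw [hfront]
        simp [List.filter_cons, hp]
    · simp only [PySem.List.insertBy, hb, if_neg, Bool.false_eq_true, not_false_iff]
      rw [List.filter_cons]
      cases hpy : p y <;> cases hp : p x <;>
        simp only [List.filter_cons, hpy, hp, if_pos, if_neg, ih hys, Bool.false_eq_true,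
          not_false_iff] <;>
        simp [PySem.List.insertBy, hb]

theorem pv_foldl_filter (p : String × Int → Bool) (xs acc : List (String × Int))
    (h : acc.Pairwise (fun a b => b.2 ≤ a.2)) :
    (xs.filter p).foldl (fun acc x => PySem.List.insertBy pvBef x acc) (acc.filter p)
      = (xs.foldl (fun acc x => PySem.List.insertBy pvBef x acc) acc).filter p := by
  induction xs generalizing acc with
  | nil => rfl
  | cons x xs ih =>
    rw [List.filter_cons]
    cases hp : p x
    · simp only [Bool.false_eq_true, if_neg, not_false_iff, List.foldl_cons]
      have := ih (PySem.List.insertBy pvBef x acc) (pv_pairwise_insertBy x acc h)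
      rw [← this, pv_filter_insertBy p x acc h, hp]
      simp
    · simp only [if_pos, List.foldl_cons]
      have := ih (PySem.List.insertBy pvBef x acc) (pv_pairwise_insertBy x acc h)
      rw [← this, pv_filter_insertBy p x acc h, hp]
      simp

-- stable sort commutes with filter (descending sort by the Int value)
theorem pv_sorted_filter (p : String × Int → Bool) (xs : List (String × Int)) :
    PySem.List.sorted (xs.filter p) (fun item => item.2) true
      = (PySem.List.sorted xs (fun item => item.2) true).filter p := by
  rw [PySem.List.sorted_rev_eq_foldl_insertBy, PySem.List.sorted_rev_eq_foldl_insertBy]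
  have := pv_foldl_filter p xs [] (by simp)
  simpa [pvBef] using this

theorem pv_eraseIdx_append {α : Type} (u w : List α) (x : α) :
    (u ++ x :: w).eraseIdx u.length = u ++ w := by
  induction u with
  | nil => rfl
  | cons a u ih => simp [ih]

theorem pv_find_unique (data : List (String × Int)) (others : String) (o : String × Int)
    (hnod : (data.map Prod.fst).Nodup) (ho : o ∈ data) (hk : o.1 = others) :
    data.find? (fun p => p.1 == others) = some o := by
  induction data with
  | nil => cases ho
  | cons a l ih =>
    have hnod' := List.nodup_cons.mp (show (a.1 :: l.map Prod.fst).Nodup by simpa using hnod)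
    rw [List.find?_cons]
    by_cases ha : (a.1 == others) = true
    · have ha' : a.1 = others := by simpa using ha
      rcases List.mem_cons.mp ho with ho | ho
      · simp [ha, ho]
      · exfalso
        have hmem : o.1 ∈ l.map Prod.fst := List.mem_map_of_mem ho
        exact hnod'.1 (by rw [ha', ← hk]; exact hmem)
    · simp only [ha] 
      rcases List.mem_cons.mp ho with ho | ho
      · exact absurd (show (a.1 == others) = true by rw [← ho]; simp [hk]) ha
      · exact ih (by simpa using hnod'.2) ho

-- A = B at a data list containing the others key, decomposed around the unique others item
theorem pv_main (data : List (String × Int)) (others : String)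
    (hnodup : (data.map Prod.fst).Nodup)
    (o : String × Int) (ho : o ∈ data) (hk : o.1 = others) :
    sort_and_unzip_labels_and_values_py data others
      = sort_and_unzip_labels_and_values_py_alt data others := by
  have hany : data.any (fun p => p.1 = others) = true := by
    refine List.any_eq_true.mpr ⟨o, ho, by simp [hk]⟩
  have hsperm : (PySem.List.sorted data (fun item => item.2) true).Perm data :=
    PySem.List.sorted_perm data (fun item => item.2) true
  have hos : o ∈ PySem.List.sorted data (fun item => item.2) true :=
    (PySem.List.mem_sorted data (fun item => item.2) true o).mpr ho
  obtain ⟨u, w, huw⟩ := List.append_of_mem hos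
  have hsnod : ((u ++ o :: w).map Prod.fst).Nodup := by
    rw [← huw]
    exact ((hsperm.map Prod.fst).nodup_iff).mpr hnodup
  have hmapuw : (u ++ o :: w).map Prod.fst = u.map Prod.fst ++ others :: w.map Prod.fst := by
    simp [hk]
  have hnu : others ∉ u.map Prod.fst := by
    rw [hmapuw] at hsnod
    rcases List.nodup_append.mp hsnod with ⟨_, _, hdisj⟩
    intro hmem; exact hdisj others hmem others (by simp) rfl
  have hnw : others ∉ w.map Prod.fst := by
    rw [hmapuw] at hsnod
    rcases List.nodup_append.mp hsnod with ⟨_, hnod2, _⟩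
    exact (List.nodup_cons.mp hnod2).1
  -- A side
  have hlabels : (u ++ o :: w).map (fun item : String × Int => item.1)
      = u.map Prod.fst ++ others :: w.map Prod.fst := by simpa using hmapuw
  have hidx : PySem.List.index? ((u ++ o :: w).map (fun item : String × Int => item.1)) others
      = some u.length := by
    rw [hlabels]
    exact (PySem.List.index?_eq_some_iff _ _ _).mpr
      ⟨u.map Prod.fst, w.map Prod.fst, rfl, by simp, hnu⟩
  have hlenL : u.length < ((u ++ o :: w).map (fun item : String × Int => item.1)).length := by simp
  have hlenV : u.length < ((u ++ o :: w).map (fun item : String × Int => item.2)).length := by simp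
  have hpopL := PySem.List.pop?_natCast ((u ++ o :: w).map (fun item : String × Int => item.1)) u.length hlenL
  have hpopV := PySem.List.pop?_natCast ((u ++ o :: w).map (fun item : String × Int => item.2)) u.length hlenV
  have hgetL : ((u ++ o :: w).map (fun item : String × Int => item.1))[u.length]'hlenL = others := by
    have : (u.map Prod.fst ++ others :: w.map Prod.fst)[(u.map Prod.fst).length]'(by simp) = others :=
      List.getElem_of_append rfl rfl
    simpa [hlabels] using this
  have hgetV : ((u ++ o :: w).map (fun item : String × Int => item.2))[u.length]'hlenV = o.2 := by
    have hV : (u ++ o :: w).map (fun item : String × Int => item.2)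
        = u.map Prod.snd ++ o.2 :: w.map Prod.snd := by simp
    have : (u.map Prod.snd ++ o.2 :: w.map Prod.snd)[(u.map Prod.snd).length]'(by simp) = o.2 :=
      List.getElem_of_append rfl rfl
    simpa [hV] using this
  have heraL : ((u ++ o :: w).map (fun item : String × Int => item.1)).eraseIdx u.length
      = u.map Prod.fst ++ w.map Prod.fst := by
    have := pv_eraseIdx_append (u.map Prod.fst) (w.map Prod.fst) others
    simpa [hlabels] using this
  have heraV : ((u ++ o :: w).map (fun item : String × Int => item.2)).eraseIdx u.length
      = u.map Prod.snd ++ w.map Prod.snd := by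
    have hV : (u ++ o :: w).map (fun item : String × Int => item.2)
        = u.map Prod.snd ++ o.2 :: w.map Prod.snd := by simp
    have := pv_eraseIdx_append (u.map Prod.snd) (w.map Prod.snd) o.2
    simpa [hV] using this
  -- B side
  have hfilter : (u ++ o :: w).filter (fun item : String × Int => item.1 != others) = u ++ w := by
    rw [List.filter_append, List.filter_cons]
    have hu : u.filter (fun item : String × Int => item.1 != others) = u := by
      refine List.filter_eq_self.mpr ?_
      intro z hz
      simp only [bne_iff_ne, ne_eq]
      intro hzz; exact hnu (hzz ▸ List.mem_map_of_mem hz)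
    have hw : w.filter (fun item : String × Int => item.1 != others) = w := by
      refine List.filter_eq_self.mpr ?_
      intro z hz
      simp only [bne_iff_ne, ne_eq]
      intro hzz; exact hnw (hzz ▸ List.mem_map_of_mem hz)
    simp [hu, hw, hk]
  have hsortfil : PySem.List.sorted (data.filter (fun item : String × Int => item.1 != others))
        (fun item => item.2) true = u ++ w := by
    rw [pv_sorted_filter, huw, hfilter]
  have hgetD : PySem.Dict.getD (PySem.Dict.mk data) others 0 = o.2 := by
    simp [PySem.Dict.getD, PySem.Dict.get?, pv_find_unique data others o hnodup ho hk]
  -- put together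
  unfold sort_and_unzip_labels_and_values_py sort_and_unzip_labels_and_values_py_alt
  have hany' : (data.any fun p => p.1 == others) = true := by
    simpa [beq_iff_eq] using hany
  simp only [huw, hidx, hpopL, hpopV, hsortfil, hgetD, hgetL, hgetV, heraL, heraV]
  simp [hany']

-- ===== VERDICT (by name: the statement is the Claim_ definition above) =====
theorem sort_and_unzip_labels_and_values_py_spec : Claim_equal_sort_and_unzip_labels_and_values_py := by
  intro data others _hdom hpre
  unfold Spec_sort_and_unzip_labels_and_values_py
  by_cases hany : data.any (fun p => p.1 == others) = true
  · rcases List.any_eq_true.mp hany with ⟨o, ho, hko⟩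
    exact pv_main data others hpre.2 o ho (by simpa using hko)
  · have hfil : data.filter (fun item : String × Int => item.1 != others) = data := by
      refine List.filter_eq_self.mpr ?_
      intro z hz
      simp only [bne_iff_ne, ne_eq]
      intro hzz
      exact hany (List.any_eq_true.mpr ⟨z, hz, by simp [hzz]⟩)
    unfold sort_and_unzip_labels_and_values_py sort_and_unzip_labels_and_values_py_alt
    simp [hany, hfil]
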